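-- pv_equiv track=rewrite | github.com/Wbx0710/HuPERWM | huperjepa/data/agent.py | _alignment_to_positions
-- ===== SOURCE A (Python) =====
-- from typing import Dict, List, Optional
--
-- def _alignment_to_positions(token_seq: List[int], blank_id: int) -> List[int]:
--     positions: List[int] = []
--     pos = -1
--     prev_non_blank = blank_id
--     for tok in token_seq:
--         if tok == blank_id:
--             positions.append(pos)
--             prev_non_blank = blank_id
--         elif tok != prev_non_blank:
--             pos += 1
--             positions.append(pos)
--             prev_non_blank = tok
--         else:
--             positions.append(pos)
--     return positions
-- ===== SOURCE B (Python) =====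
-- from typing import List
--
-- def _alignment_to_positions(token_seq: List[int], blank_id: int) -> List[int]:
--     # Pass 1: 0/1 flag per token marking the start of a new segment.
--     starts: List[int] = []
--     prev_non_blank = blank_id
--     for tok in token_seq:
--         if tok != blank_id and tok != prev_non_blank:
--             starts.append(1)
--         else:
--             starts.append(0)
--         prev_non_blank = blank_id if tok == blank_id else tok
--     # Pass 2: cumulative count of starts, minus one.
--     positions: List[int] = []
--     c = 0
--     for s in starts:
--         c += s
--         positions.append(c - 1)
--     return positions
-- ===== Notes on version B (the rewrite author's own statement) =====
-- stated objective: alternative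
-- what changed: Replaces A's single stateful loop (pos counter + append per branch) with two passes: first compute 0/1 segment-start flags, then a cumulative sum minus one gives every position.
import Mathlib
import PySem

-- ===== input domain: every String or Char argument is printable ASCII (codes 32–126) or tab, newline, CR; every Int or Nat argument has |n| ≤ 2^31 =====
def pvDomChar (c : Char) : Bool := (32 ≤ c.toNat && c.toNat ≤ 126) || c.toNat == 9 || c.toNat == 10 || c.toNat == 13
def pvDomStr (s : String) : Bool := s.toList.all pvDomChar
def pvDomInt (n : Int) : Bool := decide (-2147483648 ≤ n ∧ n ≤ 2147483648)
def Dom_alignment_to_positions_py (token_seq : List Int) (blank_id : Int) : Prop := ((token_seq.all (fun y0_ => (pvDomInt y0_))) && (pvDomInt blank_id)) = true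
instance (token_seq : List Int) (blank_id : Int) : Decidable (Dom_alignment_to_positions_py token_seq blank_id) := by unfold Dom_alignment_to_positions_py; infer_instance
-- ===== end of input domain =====

-- ===== PORT A =====
-- A: one pass; pos counter incremented on each new segment start, prev_non_blank reset on blanks.
def pvGoA (blank_id : Int) : List Int → Int → Int → List Int
  | [], _, _ => []
  | tok :: ts, pos, prev =>
    if tok = blank_id then pos :: pvGoA blank_id ts pos blank_id
    else if tok ≠ prev then (pos + 1) :: pvGoA blank_id ts (pos + 1) tok
    else pos :: pvGoA blank_id ts pos prev

def alignment_to_positions_py (token_seq : List Int) (blank_id : Int) : List Int :=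
  pvGoA blank_id token_seq (-1) blank_id

-- ===== PORT B =====
-- B: two passes — 0/1 segment-start flags, then cumulative sum minus one.
def pvStarts (blank_id : Int) : List Int → Int → List Int
  | [], _ => []
  | tok :: ts, prev =>
    (if tok ≠ blank_id ∧ tok ≠ prev then (1 : Int) else 0) ::
      pvStarts blank_id ts (if tok = blank_id then blank_id else tok)

def pvCum : List Int → Int → List Int
  | [], _ => []
  | s :: ss, c => (c + s - 1) :: pvCum ss (c + s)

def alignment_to_positions_py_alt (token_seq : List Int) (blank_id : Int) : List Int :=
  pvCum (pvStarts blank_id token_seq blank_id) 0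

-- ===== PRECONDITION & SPEC =====
def Spec_alignment_to_positions_py (token_seq : List Int) (blank_id : Int) (out : List Int) : Prop := out = alignment_to_positions_py_alt token_seq blank_id
instance (token_seq : List Int) (blank_id : Int) (out : List Int) : Decidable (Spec_alignment_to_positions_py token_seq blank_id out) := by unfold Spec_alignment_to_positions_py; infer_instance

-- ===== CLAIM (what is proved, stated in full; the proofs are below) =====
def Claim_equal_alignment_to_positions_py : Prop := ∀ (token_seq : List Int) (blank_id : Int), Dom_alignment_to_positions_py token_seq blank_id → Spec_alignment_to_positions_py token_seq blank_id (alignment_to_positions_py token_seq blank_id)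

-- ===== LEMMAS AND PROOFS =====

-- ===== VERDICT (by name: the statement is the Claim_ definition above) =====
theorem pvGoA_eq_cum (blank_id : Int) (toks : List Int) :
    ∀ (c prev : Int), pvGoA blank_id toks (c - 1) prev = pvCum (pvStarts blank_id toks prev) c := by
  induction toks with
  | nil => intro c prev; simp [pvGoA, pvStarts, pvCum]
  | cons tok ts ih =>
    intro c prev
    by_cases hb : tok = blank_id
    · simp [pvGoA, pvStarts, pvCum, hb, ih c blank_id]
    · by_cases hp : tok = prev
      · subst hp
        simp [pvGoA, pvStarts, pvCum, hb, ih c tok]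
      · have h := ih (c + 1) tok
        rw [show c + 1 - 1 = c by ring] at h
        simp [pvGoA, pvStarts, pvCum, hb, hp, h]

theorem alignment_to_positions_py_spec : Claim_equal_alignment_to_positions_py := by
  intro token_seq blank_id _
  unfold Spec_alignment_to_positions_py alignment_to_positions_py alignment_to_positions_py_alt
  have h : (-1 : Int) = 0 - 1 := by ring
  rw [h, pvGoA_eq_cum]
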